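-- pv_equiv track=rewrite | github.com/AnnaSisenina/advent_2024 | _test.py | checkDescWithPrDemp
-- ===== SOURCE A (Python) =====
-- def checkDescending(report):
--     for i in range (len(report)-1):
--         if (report[i]-report[i+1]) > 3 or (report[i]-report[i+1]) <= 0 :
--             return False
--     return True
--
-- def loopWOElement(report, i):
--     copyOfReport = report.copy()
--     del copyOfReport[i]
--     return copyOfReport
--
-- def checkDescWithPrDemp(report):
--     count = 0
--
--     if checkDescending(report):
--         return True
--     else:
--         for i in range (len(report)-1):
--             if (report[i]-report[i+1]) > 3 or (report[i]-report[i+1]) <= 0: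
--                 count += 1
--                 if count > 1:
--                     return False
--                 if i==0:
--                     check = checkDescending(loopWOElement(report, i)) or checkDescending(loopWOElement(report, i+1))
--                     return check
--                 else:
--                     check = checkDescending(loopWOElement(report, i)) or checkDescending(loopWOElement(report, i-1)) or checkDescending(loopWOElement(report, i+1))
--                     return check
--         return check
-- ===== SOURCE B (Python) =====
-- def checkDescWithPrDemp(report):
--     def ok(r):
--         return all(0 < a - b <= 3 for a, b in zip(r, r[1:]))
--     if ok(report):
--         return True
--     return any(ok(report[:i] + report[i + 1:]) for i in range(len(report)))
-- ===== Notes on version B (the rewrite author's own statement) =====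
-- stated objective: simpler
-- what changed: Replaces A's 'find the first violating pair and test only removals adjacent to it' dampener (with its threaded count and dead fall-through) by a plain brute-force dampener: check the report, then try deleting each single index and re-check; the safety check becomes an all() over zipped adjacent pairs.
import Mathlib
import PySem

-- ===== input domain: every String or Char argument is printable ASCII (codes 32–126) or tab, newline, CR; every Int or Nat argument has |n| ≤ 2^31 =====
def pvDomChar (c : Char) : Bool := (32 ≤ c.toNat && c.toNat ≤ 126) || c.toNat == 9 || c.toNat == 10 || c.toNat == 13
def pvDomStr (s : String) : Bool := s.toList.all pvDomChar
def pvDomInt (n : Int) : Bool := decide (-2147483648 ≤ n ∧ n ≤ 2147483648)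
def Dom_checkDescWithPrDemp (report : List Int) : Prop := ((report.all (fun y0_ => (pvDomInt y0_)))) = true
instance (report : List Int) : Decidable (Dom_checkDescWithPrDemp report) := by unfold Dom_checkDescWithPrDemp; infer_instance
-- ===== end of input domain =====

-- B replaces A's "locate the first violation and test only the adjacent removals" dampener by the
-- plainer exhaustive "delete each index and re-check" scan (objective: simpler; not faster).

-- ===== PORT A =====
-- checkDescending: index loop over range(len-1); indices are always in range, so getD is exact.
def descAuxA (report : List Int) (i : Nat) : Bool :=
  if _h : i + 1 < report.length then
    if report.getD i 0 - report.getD (i+1) 0 > 3 || report.getD i 0 - report.getD (i+1) 0 ≤ 0 then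
      false
    else descAuxA report (i+1)
  else true
termination_by report.length - i
decreasing_by omega

def checkDescendingA (report : List Int) : Bool := descAuxA report 0

-- loopWOElement: copy the list and delete index i (i is always in range where A calls it).
def loopWOElementA (report : List Int) (i : Nat) : List Int := report.eraseIdx i

-- the dampener loop of A; count is threaded literally (it is 0 until the first violation).
def dampAuxA (report : List Int) (i : Nat) (count : Nat) : Bool :=
  if _h : i + 1 < report.length then
    if report.getD i 0 - report.getD (i+1) 0 > 3 || report.getD i 0 - report.getD (i+1) 0 ≤ 0 then
      if count + 1 > 1 then false
      else if i = 0 then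
        checkDescendingA (loopWOElementA report i) || checkDescendingA (loopWOElementA report (i+1))
      else
        checkDescendingA (loopWOElementA report i) || checkDescendingA (loopWOElementA report (i-1)) ||
          checkDescendingA (loopWOElementA report (i+1))
    else dampAuxA report (i+1) count
  else false
  -- the fall-through `return check` of A is unreachable (it is only run when checkDescending is
  -- False, which guarantees a violating index); `false` here is never the returned value.
termination_by report.length - i
decreasing_by omega

def checkDescWithPrDemp (report : List Int) : Bool :=
  if checkDescendingA report then true else dampAuxA report 0 0

-- ===== PORT B =====
-- ok(r): all(0 < a - b <= 3 for a, b in zip(r, r[1:])) — structural recursion over adjacent pairs.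
def okB : List Int → Bool
  | a :: b :: rest => (decide (0 < a - b) && decide (a - b ≤ 3)) && okB (b :: rest)
  | _ => true

def checkDescWithPrDemp_alt (report : List Int) : Bool :=
  if okB report then true
  else (List.range report.length).any (fun i => okB (report.take i ++ report.drop (i+1)))

-- ===== PRECONDITION & SPEC =====
def Spec_checkDescWithPrDemp (report : List Int) (out : Bool) : Prop := out = checkDescWithPrDemp_alt report
instance (report : List Int) (out : Bool) : Decidable (Spec_checkDescWithPrDemp report out) := by unfold Spec_checkDescWithPrDemp; infer_instance

-- ===== CLAIM (what is proved, stated in full; the proofs are below) =====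
def Claim_equal_checkDescWithPrDemp : Prop := ∀ (report : List Int), Dom_checkDescWithPrDemp report → Spec_checkDescWithPrDemp report (checkDescWithPrDemp report)

-- ===== LEMMAS AND PROOFS =====

/-- the pair (k, k+1) is a safe descent (A's loop condition negated / B's comprehension body). -/
def goodAt (l : List Int) (k : Nat) : Prop :=
  0 < l.getD k 0 - l.getD (k+1) 0 ∧ l.getD k 0 - l.getD (k+1) 0 ≤ 3

lemma okB_iff (l : List Int) : okB l = true ↔ ∀ k, k + 1 < l.length → goodAt l k := by
  induction l with
  | nil => simp [okB]
  | cons a t ih =>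
    cases t with
    | nil =>
      simp only [okB, List.length_cons, List.length_nil]
      constructor
      · intro _ k hk; omega
      · intro _; trivial
    | cons b rest =>
      simp only [okB, Bool.and_eq_true, decide_eq_true_eq, ih]
      constructor
      · rintro ⟨⟨h1, h2⟩, h3⟩ k hk
        cases k with
        | zero => exact ⟨by simpa [goodAt] using h1, by simpa [goodAt] using h2⟩
        | succ m =>
          have := h3 m (by simpa using hk)
          simpa [goodAt] using this
      · intro h
        refine ⟨⟨?_, ?_⟩, ?_⟩
        · have := h 0 (by simp); simpa [goodAt] using this.1
        · have := h 0 (by simp); simpa [goodAt] using this.2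
        · intro m hm
          have := h (m+1) (by simpa using hm)
          simpa [goodAt] using this

lemma descAuxA_iff_aux (l : List Int) :
    ∀ n i, l.length - i ≤ n →
      (descAuxA l i = true ↔ ∀ k, i ≤ k → k + 1 < l.length → goodAt l k) := by
  intro n
  induction n with
  | zero =>
    intro i hn
    rw [descAuxA]
    have h1 : ¬ (i + 1 < l.length) := by omega
    simp only [h1, dite_false]
    constructor
    · intro _ k hk hklen; omega
    · intro _; trivial
  | succ n ih =>
    intro i hn
    rw [descAuxA]
    split_ifs with h1 h2
    · constructor
      · intro h; cases h
      · intro hall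
        exfalso
        have hg := hall i le_rfl h1
        simp only [Bool.or_eq_true, decide_eq_true_eq] at h2
        rcases hg with ⟨c1, c2⟩
        omega
    · rw [ih (i+1) (by omega)]
      constructor
      · intro h k hk hklen
        rcases Nat.eq_or_lt_of_le hk with heq | hlt
        · subst heq
          simp only [Bool.or_eq_true, decide_eq_true_eq, not_or, not_lt, not_le] at h2
          exact ⟨by omega, by omega⟩
        · exact h k hlt hklen
      · intro h k hk hklen; exact h k (by omega) hklen
    · constructor
      · intro _ k hk hklen; omega
      · intro _; trivial

lemma checkA_eq_okB (l : List Int) : checkDescendingA l = okB l := by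
  rw [Bool.eq_iff_iff, checkDescendingA, descAuxA_iff_aux l l.length 0 (by omega), okB_iff]
  constructor
  · intro h k hk; exact h k (Nat.zero_le _) hk
  · intro h k _ hk; exact h k hk

/-- a deletion away from the first violation leaves the violating pair adjacent. -/
lemma erase_far_bad (l : List Int) (i j : Nat) (hi : i + 1 < l.length) (hbad : ¬ goodAt l i)
    (hj : j < l.length) (hfar : j + 1 < i ∨ i + 1 < j) : okB (l.eraseIdx j) = false := by
  rw [← Bool.not_eq_true, okB_iff]
  push Not
  have hlen : (l.eraseIdx j).length = l.length - 1 := by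
    rw [List.length_eraseIdx]; simp [hj]
  rcases hfar with hlt | hgt
  · -- deletion strictly before the pair: the pair sits at (i-1, i) in the erased list
    refine ⟨i - 1, by omega, ?_⟩
    have hi1 : i - 1 + 1 = i := by omega
    have e1 : (l.eraseIdx j).getD (i-1) 0 = l.getD i 0 := by
      rw [List.getD_eq_getElem _ _ (by omega), List.getD_eq_getElem _ _ (by omega : i < l.length),
        List.getElem_eraseIdx_of_ge _ (by omega)]
      simp [hi1]
    have e2 : (l.eraseIdx j).getD i 0 = l.getD (i+1) 0 := by
      rw [List.getD_eq_getElem _ _ (by omega), List.getD_eq_getElem _ _ (by omega : i + 1 < l.length),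
        List.getElem_eraseIdx_of_ge _ (by omega)]
    unfold goodAt
    rw [hi1, e1, e2]
    exact hbad
  · -- deletion strictly after the pair: the pair stays at (i, i+1)
    refine ⟨i, by omega, ?_⟩
    have e1 : (l.eraseIdx j).getD i 0 = l.getD i 0 := by
      rw [List.getD_eq_getElem _ _ (by omega), List.getD_eq_getElem _ _ (by omega : i < l.length),
        List.getElem_eraseIdx_of_lt _ (by omega)]
    have e2 : (l.eraseIdx j).getD (i+1) 0 = l.getD (i+1) 0 := by
      rw [List.getD_eq_getElem _ _ (by omega), List.getD_eq_getElem _ _ (by omega : i + 1 < l.length),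
        List.getElem_eraseIdx_of_lt _ (by omega)]
    unfold goodAt
    rw [e1, e2]
    exact hbad

lemma damp_lemma_aux (l : List Int)
    (hnot : ¬ ∀ k, k + 1 < l.length → goodAt l k) :
    ∀ n i, l.length - i ≤ n →
      (∀ k, k < i → k + 1 < l.length → goodAt l k) →
      (dampAuxA l i 0 = true ↔ ∃ j, j < l.length ∧ okB (l.eraseIdx j) = true) := by
  intro n
  induction n with
  | zero =>
    intro i hn hinv
    exfalso
    exact hnot (fun k hk => hinv k (by omega) hk)
  | succ n ih =>
    intro i hn hinv
    rw [dampAuxA]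
    split_ifs with h1 h2 h3 h4
    · -- bad pair at i, count branch 0+1>1 (impossible)
      omega
    · -- bad pair at i, i = 0: A tests erase 0 and erase 1
      subst h4
      have hbad : ¬ goodAt l 0 := by
        simp only [Bool.or_eq_true, decide_eq_true_eq] at h2
        rintro ⟨c1, c2⟩; omega
      simp only [loopWOElementA, checkA_eq_okB, Bool.or_eq_true]
      constructor
      · rintro (h | h)
        · exact ⟨0, by omega, h⟩
        · exact ⟨1, by omega, h⟩
      · rintro ⟨j, hj, hok⟩
        have hnear : ¬ (j + 1 < 0 ∨ 0 + 1 < j) := by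
          intro hfar
          rw [erase_far_bad l 0 j h1 hbad hj hfar] at hok
          simp at hok
        have : j = 0 ∨ j = 1 := by omega
        rcases this with rfl | rfl
        · exact Or.inl hok
        · exact Or.inr hok
    · -- bad pair at i, i ≠ 0: A tests erase i, erase (i-1), erase (i+1)
      have hbad : ¬ goodAt l i := by
        simp only [Bool.or_eq_true, decide_eq_true_eq] at h2
        rintro ⟨c1, c2⟩; omega
      simp only [loopWOElementA, checkA_eq_okB, Bool.or_eq_true]
      constructor
      · rintro ((h | h) | h)
        · exact ⟨i, by omega, h⟩
        · exact ⟨i - 1, by omega, h⟩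
        · exact ⟨i + 1, by omega, h⟩
      · rintro ⟨j, hj, hok⟩
        have hnear : ¬ (j + 1 < i ∨ i + 1 < j) := by
          intro hfar
          rw [erase_far_bad l i j h1 hbad hj hfar] at hok
          simp at hok
        have hne : i ≠ 0 := h4
        have : j = i - 1 ∨ j = i ∨ j = i + 1 := by omega
        rcases this with rfl | rfl | rfl
        · exact Or.inl (Or.inr hok)
        · exact Or.inl (Or.inl hok)
        · exact Or.inr hok
    · -- good pair at i: step
      have hgood : goodAt l i := by
        simp only [Bool.or_eq_true, decide_eq_true_eq, not_or, not_lt, not_le] at h2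
        exact ⟨by omega, by omega⟩
      apply ih (i+1) (by omega)
      intro k hk hklen
      rcases Nat.lt_succ_iff_lt_or_eq.mp hk with hlt | rfl
      · exact hinv k hlt hklen
      · exact hgood
    · -- loop exhausted: impossible, a violation exists
      exfalso
      exact hnot (fun k hk => hinv k (by omega) hk)

lemma damp_lemma (l : List Int) (i : Nat)
    (hinv : ∀ k, k < i → k + 1 < l.length → goodAt l k)
    (hnot : ¬ ∀ k, k + 1 < l.length → goodAt l k) :
    (dampAuxA l i 0 = true ↔ ∃ j, j < l.length ∧ okB (l.eraseIdx j) = true) :=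
  damp_lemma_aux l hnot l.length i (by omega) hinv

-- ===== VERDICT (by name: the statement is the Claim_ definition above) =====
theorem checkDescWithPrDemp_spec : Claim_equal_checkDescWithPrDemp := by
  intro report _
  unfold Spec_checkDescWithPrDemp checkDescWithPrDemp checkDescWithPrDemp_alt
  rw [checkA_eq_okB]
  by_cases h : okB report = true
  · simp [h]
  · have h' : okB report = false := by simpa using h
    rw [h']
    simp only [Bool.false_eq_true, if_false]
    rw [Bool.eq_iff_iff]
    rw [damp_lemma report 0 (by omega) (by rw [← okB_iff]; simp [h'])]
    simp only [List.any_eq_true, List.mem_range, ← List.eraseIdx_eq_take_drop_succ]
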